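-- pv_equiv track=rewrite | github.com/dsoc-people/GRLevelx | mobile_mesonet/serve_placefile.py | kt_to_barb_index
-- ===== SOURCE A (Python) =====
-- def kt_to_barb_index(kt):
--     """Map knots to 1-based icon index in windbarbs.png strip.
--     Strip order: calm(1), 5kt(2), 10kt(3), ..., 60kt(11)."""
--     if kt is None:
--         return None
--     # Round to nearest 5kt, clamp to strip
--     speeds = [0, 5, 10, 15, 20, 25, 30, 35, 40, 50, 60]
--     best = 0
--     for i, s in enumerate(speeds):
--         if kt >= s - 2:
--             best = i
--     return best + 1  # 1-based
-- ===== SOURCE B (Python) =====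
-- THRESHOLDS = [-2, 3, 8, 13, 18, 23, 28, 33, 38, 48, 58]  # s - 2 for each strip speed
--
-- def kt_to_barb_index(kt):
--     """Map knots to 1-based icon index via binary search over precomputed thresholds."""
--     if kt is None:
--         return None
--     lo, hi = 0, len(THRESHOLDS)
--     while lo < hi:
--         mid = (lo + hi) // 2
--         if kt < THRESHOLDS[mid]:
--             hi = mid
--         else:
--             lo = mid + 1
--     return max(1, lo)
-- ===== Notes on version B (the rewrite author's own statement) =====
-- stated objective: idiomatic
-- what changed: Replaced A's linear scan over the 11 speeds (tracking the last satisfied threshold) with a precomputed threshold table and a binary search (bisect_right semantics), clamped to 1.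
import Mathlib
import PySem

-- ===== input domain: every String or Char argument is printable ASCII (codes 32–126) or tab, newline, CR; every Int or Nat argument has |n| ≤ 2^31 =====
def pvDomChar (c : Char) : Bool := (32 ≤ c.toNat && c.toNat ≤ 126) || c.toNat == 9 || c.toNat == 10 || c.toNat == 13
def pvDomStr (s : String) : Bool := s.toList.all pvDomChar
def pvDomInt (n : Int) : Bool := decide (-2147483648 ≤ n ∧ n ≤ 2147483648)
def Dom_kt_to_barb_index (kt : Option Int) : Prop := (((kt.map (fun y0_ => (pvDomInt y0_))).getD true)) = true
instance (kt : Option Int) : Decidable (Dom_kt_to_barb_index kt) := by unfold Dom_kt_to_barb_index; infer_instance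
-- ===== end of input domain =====

-- B replaces A's linear scan over the 11 speeds with a binary search over precomputed thresholds (simpler/idiomatic; same tiny constant cost).

-- ===== PORT A =====
def kt_to_barb_index (kt : Option Int) : Option Int :=
  match kt with
  | none => none
  | some k =>
    let speeds : List Int := [0, 5, 10, 15, 20, 25, 30, 35, 40, 50, 60]
    let best : Int :=
      (PySem.List.enumerate speeds).foldl
        (fun best (p : Int × Int) => if k ≥ p.2 - 2 then p.1 else best) 0
    some (best + 1)

-- ===== PORT B =====
def pvThresholds : List Int := [-2, 3, 8, 13, 18, 23, 28, 33, 38, 48, 58]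

-- hand-rolled binary search, step for step the while-loop of Source B (lo/hi halving);
-- fuel (= initial hi - lo) only makes the while-loop total, it is never exhausted
def pvBisect : Nat → Int → Nat → Nat → Nat
  | 0, _, lo, _ => lo
  | fuel + 1, x, lo, hi =>
    if lo < hi then
      let mid := (lo + hi) / 2
      if x < pvThresholds.getD mid 0 then pvBisect fuel x lo mid
      else pvBisect fuel x (mid + 1) hi
    else lo

def kt_to_barb_index_alt (kt : Option Int) : Option Int :=
  match kt with
  | none => none
  | some k => some (max 1 ((pvBisect pvThresholds.length k 0 pvThresholds.length : Nat) : Int))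

-- ===== PRECONDITION & SPEC =====
def Spec_kt_to_barb_index (kt : Option Int) (out : Option Int) : Prop := out = kt_to_barb_index_alt kt
instance (kt : Option Int) (out : Option Int) : Decidable (Spec_kt_to_barb_index kt out) := by unfold Spec_kt_to_barb_index; infer_instance

-- ===== CLAIM (what is proved, stated in full; the proofs are below) =====
def Claim_equal_kt_to_barb_index : Prop := ∀ (kt : Option Int), Dom_kt_to_barb_index kt → Spec_kt_to_barb_index kt (kt_to_barb_index kt)

-- ===== LEMMAS AND PROOFS =====

-- A's scan and B's binary search agree on every present knot value: 12-way interval split,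
-- each interval decides every threshold comparison, so both sides reduce to the same literal.
set_option maxRecDepth 8192 in
set_option maxHeartbeats 4000000 in
theorem kt_some_eq (k : Int) : kt_to_barb_index (some k) = kt_to_barb_index_alt (some k) := by
  by_cases h0 : k < (-2:Int)
  · simp [kt_to_barb_index, kt_to_barb_index_alt, pvBisect, pvThresholds, PySem.List.enumerate,
      show k < (-2:Int) by omega, show ¬ (0:Int) ≤ k + 2 by omega, show k < (3:Int) by omega, show ¬ (5:Int) ≤ k + 2 by omega, show k < (8:Int) by omega, show ¬ (10:Int) ≤ k + 2 by omega, show ¬ (15:Int) ≤ k + 2 by omega, show ¬ (20:Int) ≤ k + 2 by omega, show k < (23:Int) by omega, show ¬ (25:Int) ≤ k + 2 by omega, show ¬ (30:Int) ≤ k + 2 by omega, show ¬ (35:Int) ≤ k + 2 by omega, show ¬ (40:Int) ≤ k + 2 by omega, show ¬ (50:Int) ≤ k + 2 by omega, show ¬ (60:Int) ≤ k + 2 by omega]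
  by_cases h1 : k < (3:Int)
  · simp [kt_to_barb_index, kt_to_barb_index_alt, pvBisect, pvThresholds, PySem.List.enumerate,
      show ¬ k < (-2:Int) by omega, show (0:Int) ≤ k + 2 by omega, show k < (3:Int) by omega, show ¬ (5:Int) ≤ k + 2 by omega, show k < (8:Int) by omega, show ¬ (10:Int) ≤ k + 2 by omega, show ¬ (15:Int) ≤ k + 2 by omega, show ¬ (20:Int) ≤ k + 2 by omega, show k < (23:Int) by omega, show ¬ (25:Int) ≤ k + 2 by omega, show ¬ (30:Int) ≤ k + 2 by omega, show ¬ (35:Int) ≤ k + 2 by omega, show ¬ (40:Int) ≤ k + 2 by omega, show ¬ (50:Int) ≤ k + 2 by omega, show ¬ (60:Int) ≤ k + 2 by omega]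
  by_cases h2 : k < (8:Int)
  · simp [kt_to_barb_index, kt_to_barb_index_alt, pvBisect, pvThresholds, PySem.List.enumerate,
      show (0:Int) ≤ k + 2 by omega, show ¬ k < (3:Int) by omega, show (5:Int) ≤ k + 2 by omega, show k < (8:Int) by omega, show ¬ (10:Int) ≤ k + 2 by omega, show ¬ (15:Int) ≤ k + 2 by omega, show ¬ (20:Int) ≤ k + 2 by omega, show k < (23:Int) by omega, show ¬ (25:Int) ≤ k + 2 by omega, show ¬ (30:Int) ≤ k + 2 by omega, show ¬ (35:Int) ≤ k + 2 by omega, show ¬ (40:Int) ≤ k + 2 by omega, show ¬ (50:Int) ≤ k + 2 by omega, show ¬ (60:Int) ≤ k + 2 by omega]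
  by_cases h3 : k < (13:Int)
  · simp [kt_to_barb_index, kt_to_barb_index_alt, pvBisect, pvThresholds, PySem.List.enumerate,
      show (0:Int) ≤ k + 2 by omega, show (5:Int) ≤ k + 2 by omega, show ¬ k < (8:Int) by omega, show (10:Int) ≤ k + 2 by omega, show k < (13:Int) by omega, show ¬ (15:Int) ≤ k + 2 by omega, show k < (18:Int) by omega, show ¬ (20:Int) ≤ k + 2 by omega, show k < (23:Int) by omega, show ¬ (25:Int) ≤ k + 2 by omega, show ¬ (30:Int) ≤ k + 2 by omega, show ¬ (35:Int) ≤ k + 2 by omega, show ¬ (40:Int) ≤ k + 2 by omega, show ¬ (50:Int) ≤ k + 2 by omega, show ¬ (60:Int) ≤ k + 2 by omega]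
  by_cases h4 : k < (18:Int)
  · simp [kt_to_barb_index, kt_to_barb_index_alt, pvBisect, pvThresholds, PySem.List.enumerate,
      show (0:Int) ≤ k + 2 by omega, show (5:Int) ≤ k + 2 by omega, show ¬ k < (8:Int) by omega, show (10:Int) ≤ k + 2 by omega, show ¬ k < (13:Int) by omega, show (15:Int) ≤ k + 2 by omega, show k < (18:Int) by omega, show ¬ (20:Int) ≤ k + 2 by omega, show k < (23:Int) by omega, show ¬ (25:Int) ≤ k + 2 by omega, show ¬ (30:Int) ≤ k + 2 by omega, show ¬ (35:Int) ≤ k + 2 by omega, show ¬ (40:Int) ≤ k + 2 by omega, show ¬ (50:Int) ≤ k + 2 by omega, show ¬ (60:Int) ≤ k + 2 by omega]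
  by_cases h5 : k < (23:Int)
  · simp [kt_to_barb_index, kt_to_barb_index_alt, pvBisect, pvThresholds, PySem.List.enumerate,
      show (0:Int) ≤ k + 2 by omega, show (5:Int) ≤ k + 2 by omega, show ¬ k < (8:Int) by omega, show (10:Int) ≤ k + 2 by omega, show (15:Int) ≤ k + 2 by omega, show ¬ k < (18:Int) by omega, show (20:Int) ≤ k + 2 by omega, show k < (23:Int) by omega, show ¬ (25:Int) ≤ k + 2 by omega, show ¬ (30:Int) ≤ k + 2 by omega, show ¬ (35:Int) ≤ k + 2 by omega, show ¬ (40:Int) ≤ k + 2 by omega, show ¬ (50:Int) ≤ k + 2 by omega, show ¬ (60:Int) ≤ k + 2 by omega]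
  by_cases h6 : k < (28:Int)
  · simp [kt_to_barb_index, kt_to_barb_index_alt, pvBisect, pvThresholds, PySem.List.enumerate,
      show (0:Int) ≤ k + 2 by omega, show (5:Int) ≤ k + 2 by omega, show (10:Int) ≤ k + 2 by omega, show (15:Int) ≤ k + 2 by omega, show (20:Int) ≤ k + 2 by omega, show ¬ k < (23:Int) by omega, show (25:Int) ≤ k + 2 by omega, show k < (28:Int) by omega, show ¬ (30:Int) ≤ k + 2 by omega, show k < (33:Int) by omega, show ¬ (35:Int) ≤ k + 2 by omega, show k < (38:Int) by omega, show ¬ (40:Int) ≤ k + 2 by omega, show ¬ (50:Int) ≤ k + 2 by omega, show ¬ (60:Int) ≤ k + 2 by omega]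
  by_cases h7 : k < (33:Int)
  · simp [kt_to_barb_index, kt_to_barb_index_alt, pvBisect, pvThresholds, PySem.List.enumerate,
      show (0:Int) ≤ k + 2 by omega, show (5:Int) ≤ k + 2 by omega, show (10:Int) ≤ k + 2 by omega, show (15:Int) ≤ k + 2 by omega, show (20:Int) ≤ k + 2 by omega, show ¬ k < (23:Int) by omega, show (25:Int) ≤ k + 2 by omega, show ¬ k < (28:Int) by omega, show (30:Int) ≤ k + 2 by omega, show k < (33:Int) by omega, show ¬ (35:Int) ≤ k + 2 by omega, show k < (38:Int) by omega, show ¬ (40:Int) ≤ k + 2 by omega, show ¬ (50:Int) ≤ k + 2 by omega, show ¬ (60:Int) ≤ k + 2 by omega]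
  by_cases h8 : k < (38:Int)
  · simp [kt_to_barb_index, kt_to_barb_index_alt, pvBisect, pvThresholds, PySem.List.enumerate,
      show (0:Int) ≤ k + 2 by omega, show (5:Int) ≤ k + 2 by omega, show (10:Int) ≤ k + 2 by omega, show (15:Int) ≤ k + 2 by omega, show (20:Int) ≤ k + 2 by omega, show ¬ k < (23:Int) by omega, show (25:Int) ≤ k + 2 by omega, show (30:Int) ≤ k + 2 by omega, show ¬ k < (33:Int) by omega, show (35:Int) ≤ k + 2 by omega, show k < (38:Int) by omega, show ¬ (40:Int) ≤ k + 2 by omega, show ¬ (50:Int) ≤ k + 2 by omega, show ¬ (60:Int) ≤ k + 2 by omega]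
  by_cases h9 : k < (48:Int)
  · simp [kt_to_barb_index, kt_to_barb_index_alt, pvBisect, pvThresholds, PySem.List.enumerate,
      show (0:Int) ≤ k + 2 by omega, show (5:Int) ≤ k + 2 by omega, show (10:Int) ≤ k + 2 by omega, show (15:Int) ≤ k + 2 by omega, show (20:Int) ≤ k + 2 by omega, show ¬ k < (23:Int) by omega, show (25:Int) ≤ k + 2 by omega, show (30:Int) ≤ k + 2 by omega, show (35:Int) ≤ k + 2 by omega, show ¬ k < (38:Int) by omega, show (40:Int) ≤ k + 2 by omega, show k < (48:Int) by omega, show ¬ (50:Int) ≤ k + 2 by omega, show k < (58:Int) by omega, show ¬ (60:Int) ≤ k + 2 by omega]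
  by_cases h10 : k < (58:Int)
  · simp [kt_to_barb_index, kt_to_barb_index_alt, pvBisect, pvThresholds, PySem.List.enumerate,
      show (0:Int) ≤ k + 2 by omega, show (5:Int) ≤ k + 2 by omega, show (10:Int) ≤ k + 2 by omega, show (15:Int) ≤ k + 2 by omega, show (20:Int) ≤ k + 2 by omega, show ¬ k < (23:Int) by omega, show (25:Int) ≤ k + 2 by omega, show (30:Int) ≤ k + 2 by omega, show (35:Int) ≤ k + 2 by omega, show ¬ k < (38:Int) by omega, show (40:Int) ≤ k + 2 by omega, show ¬ k < (48:Int) by omega, show (50:Int) ≤ k + 2 by omega, show k < (58:Int) by omega, show ¬ (60:Int) ≤ k + 2 by omega]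
  · simp [kt_to_barb_index, kt_to_barb_index_alt, pvBisect, pvThresholds, PySem.List.enumerate,
      show (0:Int) ≤ k + 2 by omega, show (5:Int) ≤ k + 2 by omega, show (10:Int) ≤ k + 2 by omega, show (15:Int) ≤ k + 2 by omega, show (20:Int) ≤ k + 2 by omega, show ¬ k < (23:Int) by omega, show (25:Int) ≤ k + 2 by omega, show (30:Int) ≤ k + 2 by omega, show (35:Int) ≤ k + 2 by omega, show ¬ k < (38:Int) by omega, show (40:Int) ≤ k + 2 by omega, show (50:Int) ≤ k + 2 by omega, show ¬ k < (58:Int) by omega, show (60:Int) ≤ k + 2 by omega]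

-- ===== VERDICT (by name: the statement is the Claim_ definition above) =====
theorem kt_to_barb_index_spec : Claim_equal_kt_to_barb_index := by
  intro kt _
  unfold Spec_kt_to_barb_index
  cases kt with
  | none => rfl
  | some k => exact kt_some_eq k
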